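-- pv_equiv track=rewrite | github.com/maxecoulter/BaRT-2 | BaRT_2_filter_binomial.py | five_prime_support_hunter2
-- ===== SOURCE A (Python) =====
-- def five_prime_support_hunter2(start,startwindow,startsdict,highexpressed):
-- 	try:
-- 		if startsdict[start] > 1:
-- 			return True
-- 	except KeyError:
-- 		pass
-- 	except TypeError:
-- 		pass
-- 	for i in range(start - startwindow,start + startwindow + 1):
-- 		if i in startsdict.keys():
-- 			if not highexpressed:
-- 				if startsdict[i] >= 1 and i != start:
-- 					return True
-- 			else:
-- 				return True
-- 	return False
-- ===== SOURCE B (Python) =====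
-- def five_prime_support_hunter2(start, startwindow, startsdict, highexpressed):
--     v = startsdict.get(start)
--     if v is not None and v > 1:
--         return True
--     lo = start - startwindow
--     hi = start + startwindow
--     if highexpressed:
--         return any(lo <= k <= hi for k in startsdict)
--     return any(lo <= k <= hi and k != start and val >= 1 for k, val in startsdict.items())
-- ===== Notes on version B (the rewrite author's own statement) =====
-- stated objective: alternative
-- what changed: B replaces A's scan over every integer position of the window (plus the try/except lookup) with a single .get for the start key and one pass over the dict's items testing each key for window membership; cost scales with the dict size instead of the window width.
import Mathlib
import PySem

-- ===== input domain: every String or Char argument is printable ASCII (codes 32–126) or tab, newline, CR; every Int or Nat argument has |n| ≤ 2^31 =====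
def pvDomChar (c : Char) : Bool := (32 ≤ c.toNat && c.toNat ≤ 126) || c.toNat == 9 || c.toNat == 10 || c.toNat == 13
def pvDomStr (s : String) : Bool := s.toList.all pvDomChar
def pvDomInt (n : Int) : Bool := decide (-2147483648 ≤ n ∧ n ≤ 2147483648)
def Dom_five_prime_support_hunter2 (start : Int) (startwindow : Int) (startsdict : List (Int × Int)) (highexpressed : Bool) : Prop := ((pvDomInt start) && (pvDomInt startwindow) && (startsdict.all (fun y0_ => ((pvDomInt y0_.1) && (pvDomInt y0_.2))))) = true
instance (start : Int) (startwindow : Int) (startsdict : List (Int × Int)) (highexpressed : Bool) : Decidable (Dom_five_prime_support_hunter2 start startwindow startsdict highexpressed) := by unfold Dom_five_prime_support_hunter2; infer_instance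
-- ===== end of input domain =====

-- B iterates once over the dict's entries instead of over every integer position of the
-- window (an alternative traversal of the same data; no speed claim).

-- ===== PORT A =====
-- the `for i in range(...)` loop with its early returns
def fiveA_loop (start : Int) (highexpressed : Bool) (startsdict : List (Int × Int)) : List Int → Bool
  | [] => false
  | i :: rest =>
    match startsdict.find? (fun q => q.1 == i) with       -- `i in startsdict.keys()` / `startsdict[i]`
    | some p =>
      if !highexpressed then
        if decide (1 ≤ p.2) && decide (i ≠ start) then true
        else fiveA_loop start highexpressed startsdict rest
      else true
    | none => fiveA_loop start highexpressed startsdict rest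

def five_prime_support_hunter2 (start : Int) (startwindow : Int) (startsdict : List (Int × Int)) (highexpressed : Bool) : Bool :=
  -- try: if startsdict[start] > 1: return True  (KeyError passed)
  match startsdict.find? (fun q => q.1 == start) with
  | some p =>
    if p.2 > 1 then true
    else fiveA_loop start highexpressed startsdict
          (PySem.List.pyRange (start - startwindow) (start + startwindow + 1) 1)
  | none => fiveA_loop start highexpressed startsdict
          (PySem.List.pyRange (start - startwindow) (start + startwindow + 1) 1)

-- ===== PORT B =====
def five_prime_support_hunter2_alt (start : Int) (startwindow : Int) (startsdict : List (Int × Int)) (highexpressed : Bool) : Bool :=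
  -- v = startsdict.get(start); if v is not None and v > 1: return True
  if (match startsdict.find? (fun q => q.1 == start) with
      | some p => decide (p.2 > 1)
      | none => false) then true
  else
    let lo := start - startwindow
    let hi := start + startwindow
    if highexpressed then
      startsdict.any (fun p => decide (lo ≤ p.1) && decide (p.1 ≤ hi))
    else
      startsdict.any (fun p => decide (lo ≤ p.1) && decide (p.1 ≤ hi) && decide (p.1 ≠ start) && decide (1 ≤ p.2))

-- ===== PRECONDITION & SPEC =====
-- Pre_ excludes association lists with duplicate keys: a Python dict cannot contain them,
-- so they correspond to no input of the Python programs.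
def Pre_five_prime_support_hunter2 (start : Int) (startwindow : Int) (startsdict : List (Int × Int)) (highexpressed : Bool) : Prop :=
  (startsdict.map Prod.fst).Nodup
instance (start : Int) (startwindow : Int) (startsdict : List (Int × Int)) (highexpressed : Bool) : Decidable (Pre_five_prime_support_hunter2 start startwindow startsdict highexpressed) := by unfold Pre_five_prime_support_hunter2; infer_instance

def pvWitness_five_prime_support_hunter2 : Int × Int × (List (Int × Int)) × Bool := (5, 3, [(4, 2), (9, 0)], false)

def Spec_five_prime_support_hunter2 (start : Int) (startwindow : Int) (startsdict : List (Int × Int)) (highexpressed : Bool) (out : Bool) : Prop := out = five_prime_support_hunter2_alt start startwindow startsdict highexpressed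
instance (start : Int) (startwindow : Int) (startsdict : List (Int × Int)) (highexpressed : Bool) (out : Bool) : Decidable (Spec_five_prime_support_hunter2 start startwindow startsdict highexpressed out) := by unfold Spec_five_prime_support_hunter2; infer_instance

-- ===== CLAIM (what is proved, stated in full; the proofs are below) =====
def Claim_equal_five_prime_support_hunter2 : Prop := ∀ (start : Int) (startwindow : Int) (startsdict : List (Int × Int)) (highexpressed : Bool), Dom_five_prime_support_hunter2 start startwindow startsdict highexpressed → Pre_five_prime_support_hunter2 start startwindow startsdict highexpressed → Spec_five_prime_support_hunter2 start startwindow startsdict highexpressed (five_prime_support_hunter2 start startwindow startsdict highexpressed)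

-- ===== LEMMAS AND PROOFS =====

-- A's loop is an `any` of its body's condition over the traversed list
lemma fiveA_loop_eq_any (start : Int) (h : Bool) (d : List (Int × Int)) (xs : List Int) :
    fiveA_loop start h d xs =
      xs.any (fun i => (d.find? (fun q => q.1 == i)).elim false
        (fun p => h || (decide (1 ≤ p.2) && decide (i ≠ start)))) := by
  induction xs with
  | nil => rfl
  | cons i rest ih =>
    simp only [fiveA_loop, List.any_cons, ih]
    cases hf : d.find? (fun q => q.1 == i) with
    | none => simp
    | some p =>
      cases h <;> simp [Option.elim]

-- with duplicate-free keys, first-match lookup is membership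
lemma find?_key_eq_some_iff (d : List (Int × Int)) (hnd : (d.map Prod.fst).Nodup)
    (k : Int) (p : Int × Int) :
    d.find? (fun q => q.1 == k) = some p ↔ p ∈ d ∧ p.1 = k := by
  induction d with
  | nil => simp
  | cons q rest ih =>
    simp only [List.map_cons, List.nodup_cons] at hnd
    by_cases hq : q.1 = k
    · have hpos : (fun (r : Int × Int) => r.1 == k) q = true := by simpa using hq
      rw [List.find?_cons_of_pos (p := fun r : Int × Int => r.1 == k) (a := q) (l := rest) hpos]
      constructor
      · intro hsp
        injection hsp with hqp
        subst hqp
        exact ⟨List.mem_cons_self, hq⟩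
      · rintro ⟨hmem, hpk⟩
        rcases List.mem_cons.mp hmem with rfl | hmem
        · rfl
        · have hin : p.1 ∈ List.map Prod.fst rest := List.mem_map.mpr ⟨p, hmem, rfl⟩
          rw [hpk, ← hq] at hin
          exact absurd hin hnd.1
    · have hneg : ¬ (fun (r : Int × Int) => r.1 == k) q = true := by simpa using hq
      rw [List.find?_cons_of_neg (p := fun r : Int × Int => r.1 == k) (a := q) (l := rest) hneg]
      rw [ih hnd.2]
      constructor
      · rintro ⟨hmem, hpk⟩; exact ⟨List.mem_cons_of_mem _ hmem, hpk⟩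
      · rintro ⟨hmem, hpk⟩
        rcases List.mem_cons.mp hmem with rfl | hmem
        · exact absurd hpk hq
        · exact ⟨hmem, hpk⟩

lemma find?_key_isSome_iff (d : List (Int × Int)) (k : Int) :
    (d.find? (fun q => q.1 == k)).isSome = true ↔ ∃ p ∈ d, p.1 = k := by
  rw [List.find?_isSome]; simp

lemma elim_true_eq_isSome (o : Option (Int × Int)) :
    (o.elim false fun _ => true) = o.isSome := by cases o <;> rfl

-- the window scan equals the key scan, highexpressed = True
lemma range_scan_eq_key_scan_high (start startwindow : Int) (d : List (Int × Int)) :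
    fiveA_loop start true d (PySem.List.pyRange (start - startwindow) (start + startwindow + 1) 1) =
      d.any (fun p => decide (start - startwindow ≤ p.1) && decide (p.1 ≤ start + startwindow)) := by
  rw [fiveA_loop_eq_any, Bool.eq_iff_iff]
  simp only [Bool.true_or, elim_true_eq_isSome, List.any_eq_true,
    PySem.List.mem_pyRange_one, Bool.and_eq_true, decide_eq_true_eq]
  constructor
  · rintro ⟨i, ⟨hlo, hhi⟩, hcond⟩
    obtain ⟨p, hmem, hpk⟩ := (find?_key_isSome_iff d i).mp hcond
    exact ⟨p, hmem, by omega, by omega⟩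
  · rintro ⟨p, hmem, hlo, hhi⟩
    exact ⟨p.1, ⟨hlo, by omega⟩, (find?_key_isSome_iff d p.1).mpr ⟨p, hmem, rfl⟩⟩

-- the window scan equals the key scan, highexpressed = False (needs duplicate-free keys)
lemma range_scan_eq_key_scan_low (start startwindow : Int) (d : List (Int × Int))
    (hnd : (d.map Prod.fst).Nodup) :
    fiveA_loop start false d (PySem.List.pyRange (start - startwindow) (start + startwindow + 1) 1) =
      d.any (fun p => decide (start - startwindow ≤ p.1) && decide (p.1 ≤ start + startwindow) && decide (p.1 ≠ start) && decide (1 ≤ p.2)) := by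
  rw [fiveA_loop_eq_any, Bool.eq_iff_iff]
  simp only [Bool.false_or, List.any_eq_true,
    PySem.List.mem_pyRange_one, Bool.and_eq_true, decide_eq_true_eq]
  constructor
  · rintro ⟨i, ⟨hlo, hhi⟩, hcond⟩
    cases hf : d.find? (fun q => q.1 == i) with
    | none => rw [hf] at hcond; simp at hcond
    | some p =>
      rw [hf] at hcond
      simp only [Option.elim, Bool.and_eq_true, decide_eq_true_eq] at hcond
      have hm := (find?_key_eq_some_iff d hnd i p).mp hf
      exact ⟨p, hm.1, ⟨⟨by omega, by omega⟩, by rw [hm.2]; exact hcond.2⟩, hcond.1⟩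
  · rintro ⟨p, hmem, ⟨⟨hlo, hhi⟩, hne⟩, hv⟩
    refine ⟨p.1, ⟨hlo, by omega⟩, ?_⟩
    rw [(find?_key_eq_some_iff d hnd p.1 p).mpr ⟨hmem, rfl⟩]
    simp only [Option.elim, Bool.and_eq_true, decide_eq_true_eq]
    exact ⟨hv, hne⟩

-- ===== VERDICT (by name: the statement is the Claim_ definition above) =====
theorem five_prime_support_hunter2_spec : Claim_equal_five_prime_support_hunter2 := by
  intro start startwindow startsdict highexpressed _hdom hpre
  unfold Spec_five_prime_support_hunter2
  unfold five_prime_support_hunter2 five_prime_support_hunter2_alt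
  have hkey : fiveA_loop start highexpressed startsdict
      (PySem.List.pyRange (start - startwindow) (start + startwindow + 1) 1) =
      (if highexpressed then
        startsdict.any (fun p => decide (start - startwindow ≤ p.1) && decide (p.1 ≤ start + startwindow))
      else
        startsdict.any (fun p => decide (start - startwindow ≤ p.1) && decide (p.1 ≤ start + startwindow) && decide (p.1 ≠ start) && decide (1 ≤ p.2))) := by
    cases highexpressed with
    | true => simpa using range_scan_eq_key_scan_high start startwindow startsdict
    | false => simpa using range_scan_eq_key_scan_low start startwindow startsdict hpre
  cases hf : startsdict.find? (fun q => q.1 == start) with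
  | none => simpa using hkey
  | some p =>
    by_cases hp : p.2 > 1
    · simp [hp]
    · simpa [hp] using hkey
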